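-- pv_equiv track=rewrite | github.com/MrBrantCode/unitest_baseline | mut_generate/mist_train_cf/cf_82213/solution.py | minSubMatrixSum
-- ===== SOURCE A (Python) =====
-- def minSubMatrixSum(nums):
--     H, W = len(nums), len(nums[0])
--
--     dp = [[0] * (W + 1) for _ in range(H + 1)]
--     ans = float('inf')
--
--     for i in range(1, H + 1):
--         for j in range(1, W + 1):
--             # Calculating prefix sum
--             dp[i][j] = nums[i-1][j-1] + dp[i-1][j] + dp[i][j-1] - dp[i-1][j-1]
--             # Now for each (i,j) we find the minimum submatrix sum.
--             for h in range(i):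
--                 for w in range(j):
--                     ans = min(ans, dp[i][j] - dp[h][j] - dp[i][w] + dp[h][w])
--
--     # Returning the minimum sum of sub-matrix
--     return ans
-- ===== SOURCE B (Python) =====
-- def minSubMatrixSum(nums):
--     H, W = len(nums), len(nums[0])
--     # C[i][j] = sum of nums[r][c] for r < i, c < j, built row by row from row prefix sums.
--     C = [[0] * (W + 1)]
--     for row in nums:
--         acc = 0
--         rp = [0]
--         for c in range(W):
--             acc = acc + row[c]
--             rp.append(acc)
--         C.append([C[-1][j] + rp[j] for j in range(W + 1)])
--     # For each pair of rows (top h, bottom i) the band's column prefix sums are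
--     # S[j] = C[i][j] - C[h][j]; the minimum band sum ending at column j is
--     # S[j] - max(S[w] : w < j), tracked by a running maximum (Kadane-style).
--     best = None
--     for h in range(H):
--         for i in range(h + 1, H + 1):
--             mx = 0
--             for j in range(1, W + 1):
--                 s = C[i][j] - C[h][j]
--                 v = s - mx
--                 if best is None or v < best:
--                     best = v
--                 if s > mx:
--                     mx = s
--     return best
-- ===== Notes on version B (the rewrite author's own statement) =====
-- stated objective: faster
-- what changed: Replaces the quadruple loop over all (top,bottom,left,right) prefix-sum corners by fixing a row pair, collapsing the band to column prefix sums and scanning once with a running maximum prefix (Kadane-style min-subarray).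
-- outside the precondition, e.g. on minSubMatrixSum([[]]): A returns inf, B returns None; on minSubMatrixSum([]): A raises IndexError, B raises IndexError
import Mathlib
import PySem

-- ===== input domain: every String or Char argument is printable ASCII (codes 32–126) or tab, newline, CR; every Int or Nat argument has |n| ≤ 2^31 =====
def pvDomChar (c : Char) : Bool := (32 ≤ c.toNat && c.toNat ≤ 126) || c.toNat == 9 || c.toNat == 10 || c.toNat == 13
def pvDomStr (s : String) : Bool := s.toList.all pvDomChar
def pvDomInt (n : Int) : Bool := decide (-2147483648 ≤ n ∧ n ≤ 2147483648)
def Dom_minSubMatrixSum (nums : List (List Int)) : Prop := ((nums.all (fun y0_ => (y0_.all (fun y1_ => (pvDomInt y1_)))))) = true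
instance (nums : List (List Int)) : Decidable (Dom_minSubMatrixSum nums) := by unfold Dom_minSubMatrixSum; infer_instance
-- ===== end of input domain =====

-- B replaces A's quadruple corner scan by a row-pair loop over band column prefix sums with a
-- Kadane-style running-maximum scan (O(H^2*W) instead of O(H^2*W^2)); return value only, no mutation.

-- ===== PORT A =====
-- cell read dp[r][c] / nums[r][c]; indices are in range on every access made under Pre_
def pvG (m : List (List Int)) (r c : Nat) : Int := (m.getD r []).getD c 0
-- assignment dp[r][c] = v (in range under Pre_)
def pvSet2 (m : List (List Int)) (r c : Nat) (v : Int) : List (List Int) :=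
  m.set r ((m.getD r []).set c v)
-- ans = min(ans, x) with ans starting at float('inf'), carried as Option Int (none = inf)
def pvMin (a : Option Int) (x : Int) : Option Int :=
  match a with
  | none => some x
  | some m => some (min m x)
-- the two inner loops 'for h in range(i): for w in range(j): ans = min(...)'
def pvAInner (dp : List (List Int)) (i j : Nat) (a : Option Int) : Option Int :=
  (List.range i).foldl (fun a h =>
    (List.range j).foldl (fun a w =>
      pvMin a (pvG dp i j - pvG dp h j - pvG dp i w + pvG dp h w)) a) a
-- body of 'for j in range(1, W+1)' (j = j'+1 as j' runs over 0..W-1)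
def pvAStepJ (nums : List (List Int)) (i : Nat) (st : List (List Int) × Option Int) (j' : Nat) :
    List (List Int) × Option Int :=
  let j := j' + 1
  let v := (nums.getD (i-1) []).getD (j-1) 0 + pvG st.1 (i-1) j + pvG st.1 i (j-1)
             - pvG st.1 (i-1) (j-1)
  let dp' := pvSet2 st.1 i j v
  (dp', pvAInner dp' i j st.2)
-- body of 'for i in range(1, H+1)' (i = i'+1)
def pvAStepI (nums : List (List Int)) (W : Nat) (st : List (List Int) × Option Int) (i' : Nat) :
    List (List Int) × Option Int :=
  (List.range W).foldl (pvAStepJ nums (i'+1)) st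

def minSubMatrixSum (nums : List (List Int)) : Int :=
  let H := nums.length
  let W := (nums.headD []).length   -- len(nums[0]); Pre_ excludes nums = [] (IndexError)
  let st := (List.range H).foldl (pvAStepI nums W)
    (List.replicate (H+1) (List.replicate (W+1) (0:Int)), (none : Option Int))
  st.2.getD 0   -- under Pre_ both loops run, so ans ≠ none; Python's float('inf') case is outside Pre_

-- ===== PORT B =====
-- acc/rp loop: rp = [0]; for c in range(W): acc += row[c]; rp.append(acc)
def pvRowPref (row : List Int) (W : Nat) : List Int :=
  ((List.range W).foldl
    (fun (st : Int × List Int) c => (st.1 + row.getD c 0, st.2 ++ [st.1 + row.getD c 0]))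
    ((0:Int), [(0:Int)])).2
-- body of 'for row in nums': C.append([C[-1][j] + rp[j] for j in range(W+1)])
def pvBStepRow (W : Nat) (C : List (List Int)) (row : List Int) : List (List Int) :=
  let rp := pvRowPref row W
  C ++ [(List.range (W+1)).map (fun j => (C.getLastD []).getD j 0 + rp.getD j 0)]
-- body of 'for j in range(1, W+1)': state (mx, best)
def pvBScanJ (C : List (List Int)) (h i : Nat) (st : Int × Option Int) (j' : Nat) :
    Int × Option Int :=
  let j := j' + 1
  let s := pvG C i j - pvG C h j
  let v := s - st.1
  let b' := match st.2 with
    | none => some v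
    | some b => if v < b then some v else some b
  ((if st.1 < s then s else st.1), b')
-- one band (top row h, bottom row i): mx = 0; for j in range(1, W+1): ...
def pvBBand (C : List (List Int)) (W h i : Nat) (best : Option Int) : Option Int :=
  ((List.range W).foldl (pvBScanJ C h i) ((0:Int), best)).2

def minSubMatrixSum_alt (nums : List (List Int)) : Int :=
  let H := nums.length
  let W := (nums.headD []).length   -- len(nums[0]); Pre_ excludes nums = []
  let C := nums.foldl (pvBStepRow W) [List.replicate (W+1) (0:Int)]
  let best := (List.range H).foldl (fun best h =>
      -- 'for i in range(h+1, H+1)' : i = h+1+d as d runs over 0..H-h-1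
      (List.range (H - h)).foldl (fun best d => pvBBand C W h (h+1+d) best) best)
    (none : Option Int)
  best.getD 0   -- best ≠ none under Pre_; Python returns None only outside Pre_

-- ===== PRECONDITION & SPEC =====
-- Pre_ excludes: nums = [] and rows shorter than row 0 (A raises IndexError there), and
-- matrices whose first row is empty (A returns float('inf'), not an int; B returns None).
def Pre_minSubMatrixSum (nums : List (List Int)) : Prop :=
  nums ≠ [] ∧ 0 < (nums.headD []).length ∧ ∀ r ∈ nums, (nums.headD []).length ≤ r.length
instance (nums : List (List Int)) : Decidable (Pre_minSubMatrixSum nums) := by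
  unfold Pre_minSubMatrixSum; infer_instance
def pvWitness_minSubMatrixSum : List (List Int) := [[1, -2], [-3, 4]]

def Spec_minSubMatrixSum (nums : List (List Int)) (out : Int) : Prop := out = minSubMatrixSum_alt nums
instance (nums : List (List Int)) (out : Int) : Decidable (Spec_minSubMatrixSum nums out) := by
  unfold Spec_minSubMatrixSum; infer_instance

-- ===== CLAIM (what is proved, stated in full; the proofs are below) =====
def Claim_equal_minSubMatrixSum : Prop := ∀ (nums : List (List Int)), Dom_minSubMatrixSum nums → Pre_minSubMatrixSum nums → Spec_minSubMatrixSum nums (minSubMatrixSum nums)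

-- ===== LEMMAS AND PROOFS =====

-- prefix sum P i j = sum of nums[r][c] over r < i, c < j (the value of dp[i][j] and C[i][j])
def pvP (nums : List (List Int)) (i j : Nat) : Int :=
  ∑ r ∈ Finset.range i, ∑ c ∈ Finset.range j, (nums.getD r []).getD c 0
-- the sum of the submatrix with rows h..i-1 and columns w..j-1
def pvVal (nums : List (List Int)) (h i w j : Nat) : Int :=
  pvP nums i j - pvP nums h j - pvP nums i w + pvP nums h w
-- the values A's inner double loop folds at cell (i,j)
def pvCell (nums : List (List Int)) (i j : Nat) : List Int :=
  (List.range i).flatMap (fun h => (List.range j).map (fun w => pvVal nums h i w j))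
-- all values A folds during row i
def pvRowL (nums : List (List Int)) (W i : Nat) : List Int :=
  (List.range W).flatMap (fun j' => pvCell nums i (j'+1))
-- all values A folds during the first n rows
def pvLA (nums : List (List Int)) (W n : Nat) : List Int :=
  (List.range n).flatMap (fun i' => pvRowL nums W (i'+1))
-- all values B folds for the band (h, i)
def pvBandL (nums : List (List Int)) (W h i : Nat) : List Int :=
  (List.range W).flatMap (fun j' => (List.range (j'+1)).map (fun w => pvVal nums h i w (j'+1)))
-- all values B folds
def pvLB (nums : List (List Int)) (H W : Nat) : List Int :=
  (List.range H).flatMap (fun h => (List.range (H - h)).flatMap (fun d => pvBandL nums W h (h+1+d)))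

theorem pvP_zero_right (nums : List (List Int)) (i : Nat) : pvP nums i 0 = 0 := by
  simp [pvP]

theorem pvP_succ_succ (nums : List (List Int)) (i j : Nat) :
    pvP nums (i+1) (j+1) =
      (nums.getD i []).getD j 0 + pvP nums i (j+1) + pvP nums (i+1) j - pvP nums i j := by
  simp [pvP, Finset.sum_range_succ]; ring

theorem foldl_min_min (l : List Int) (a b : Int) :
    l.foldl min (min a b) = min a (l.foldl min b) := by
  induction l generalizing b with
  | nil => rfl
  | cons x t ih => simp only [List.foldl_cons, min_assoc, ih]

-- pvMin-fold facts --------------------------------------------------------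

theorem foldl_pvMin_some (l : List Int) (m : Int) :
    l.foldl pvMin (some m) = some (l.foldl min m) := by
  induction l generalizing m with
  | nil => rfl
  | cons x t ih => simp [pvMin, ih]

theorem foldl_pvMin_cons (l : List Int) (x : Int) (a : Option Int) :
    (x :: l).foldl pvMin a = pvMin a (l.foldl min x) := by
  cases a with
  | none => simp [pvMin, foldl_pvMin_some]
  | some m => simp [pvMin, foldl_pvMin_some, foldl_min_min]

theorem foldl_pvMin_le (l : List Int) (x : Int) (hx : x ∈ l) (m : Int)
    (h : l.foldl pvMin none = some m) : m ≤ x := by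
  cases l with
  | nil => simp at hx
  | cons y t =>
    rw [foldl_pvMin_cons] at h
    simp only [pvMin, Option.some.injEq] at h
    subst h
    rcases List.mem_cons.1 hx with rfl | hx
    · exact (PySem.List.foldl_min_le t x).1
    · exact (PySem.List.foldl_min_le t y).2 x hx

theorem foldl_pvMin_mem (l : List Int) (m : Int)
    (h : l.foldl pvMin none = some m) : m ∈ l := by
  cases l with
  | nil => simp [List.foldl] at h
  | cons y t =>
    rw [foldl_pvMin_cons] at h
    simp only [pvMin, Option.some.injEq] at h
    subst h
    rcases PySem.List.foldl_min_mem t y with h | h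
    · rw [h]; exact List.mem_cons_self
    · exact List.mem_cons_of_mem _ h

theorem foldl_pvMin_congr (l₁ l₂ : List Int) (h₁ : l₁ ≠ []) (h₂ : l₂ ≠ [])
    (hm : ∀ x, x ∈ l₁ ↔ x ∈ l₂) :
    l₁.foldl pvMin none = l₂.foldl pvMin none := by
  obtain ⟨x₁, t₁, rfl⟩ := List.exists_cons_of_ne_nil h₁
  obtain ⟨x₂, t₂, rfl⟩ := List.exists_cons_of_ne_nil h₂
  rw [foldl_pvMin_cons, foldl_pvMin_cons]
  simp only [pvMin, Option.some.injEq]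
  apply le_antisymm
  · exact foldl_pvMin_le _ _ ((hm _).2 (foldl_pvMin_mem _ _ (foldl_pvMin_cons t₂ x₂ none)))
      _ (foldl_pvMin_cons t₁ x₁ none)
  · exact foldl_pvMin_le _ _ ((hm _).1 (foldl_pvMin_mem _ _ (foldl_pvMin_cons t₁ x₁ none)))
      _ (foldl_pvMin_cons t₂ x₂ none)

-- membership in the two value lists ---------------------------------------

theorem mem_pvLA_iff (nums : List (List Int)) (W n : Nat) (x : Int) :
    x ∈ pvLA nums W n ↔
      ∃ h i w j, h < i ∧ i ≤ n ∧ w < j ∧ j ≤ W ∧ x = pvVal nums h i w j := by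
  simp only [pvLA, pvRowL, pvCell, List.mem_flatMap, List.mem_map, List.mem_range]
  constructor
  · rintro ⟨i', hi', j', hj', h, hh, w, hw, rfl⟩
    exact ⟨h, i'+1, w, j'+1, hh, by omega, hw, by omega, rfl⟩
  · rintro ⟨h, i, w, j, hh, hi, hw, hj, rfl⟩
    refine ⟨i-1, by omega, j-1, by omega, h, by omega, w, by omega, ?_⟩
    have h1 : i-1+1 = i := by omega
    have h2 : j-1+1 = j := by omega
    rw [h1, h2]

theorem mem_pvLB_iff (nums : List (List Int)) (H W : Nat) (x : Int) :
    x ∈ pvLB nums H W ↔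
      ∃ h i w j, h < i ∧ i ≤ H ∧ w < j ∧ j ≤ W ∧ x = pvVal nums h i w j := by
  simp only [pvLB, pvBandL, List.mem_flatMap, List.mem_map, List.mem_range]
  constructor
  · rintro ⟨h, hh, d, hd, j', hj', w, hw, rfl⟩
    exact ⟨h, h+1+d, w, j'+1, by omega, by omega, hw, by omega, rfl⟩
  · rintro ⟨h, i, w, j, hh, hi, hw, hj, rfl⟩
    refine ⟨h, by omega, i-h-1, by omega, j-1, by omega, w, by omega, ?_⟩
    have h1 : h+1+(i-h-1) = i := by omega
    have h2 : j-1+1 = j := by omega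
    rw [h1, h2]

-- ===== A-side: dp-table invariant =====

def pvInv (nums : List (List Int)) (H W i j : Nat) (dp : List (List Int)) : Prop :=
  dp.length = H+1 ∧ (∀ row ∈ dp, row.length = W+1) ∧
  (∀ r, pvG dp r 0 = 0) ∧
  (∀ r c, r ≤ H → c ≤ W → (r < i ∨ (r = i ∧ c ≤ j)) → pvG dp r c = pvP nums r c)

theorem pvGetD_set {α : Type} (l : List α) (i j : Nat) (x d : α) :
    (l.set i x).getD j d = if i = j ∧ i < l.length then x else l.getD j d := by
  rw [List.getD_eq_getElem?_getD, List.getD_eq_getElem?_getD, List.getElem?_set]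
  split_ifs <;> simp_all
  omega

theorem pvG_set2 (m : List (List Int)) (r c : Nat) (v : Int) (r' c' : Nat)
    (hr : r < m.length) (hc : c < (m.getD r []).length) :
    pvG (pvSet2 m r c v) r' c' = if r' = r ∧ c' = c then v else pvG m r' c' := by
  unfold pvG pvSet2
  rw [pvGetD_set]
  rcases eq_or_ne r' r with rfl | hne
  · rw [if_pos ⟨rfl, hr⟩, pvGetD_set]
    split_ifs with h h' h' <;> first | rfl | omega
  · rw [if_neg (by tauto), if_neg (by tauto)]

theorem pvSet2_shape (m : List (List Int)) (r c : Nat) (v : Int) (H W : Nat)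
    (hr : r < m.length) (h1 : m.length = H+1) (h2 : ∀ row ∈ m, row.length = W+1) :
    (pvSet2 m r c v).length = H+1 ∧ ∀ row ∈ pvSet2 m r c v, row.length = W+1 := by
  refine ⟨by simpa [pvSet2] using h1, ?_⟩
  intro row hrow
  rcases List.mem_or_eq_of_mem_set hrow with h | rfl
  · exact h2 _ h
  · rw [List.length_set]
    exact h2 _ (by rw [List.getD_eq_getElem _ _ hr]; exact List.getElem_mem hr)

theorem pvInv_init (nums : List (List Int)) (H W : Nat) :
    pvInv nums H W 1 0 (List.replicate (H+1) (List.replicate (W+1) (0:Int))) := by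
  have hz : ∀ r c : Nat, pvG (List.replicate (H+1) (List.replicate (W+1) (0:Int))) r c = 0 := by
    intro r c
    simp only [pvG, List.getD_eq_getElem?_getD, List.getElem?_replicate]
    split_ifs <;> simp
  refine ⟨by simp, by intro row hrow; simp_all [List.eq_of_mem_replicate hrow], fun r => hz r 0, ?_⟩
  intro r c _ _ hcase
  rcases hcase with h | ⟨rfl, hc⟩
  · interval_cases r
    rw [hz]; simp [pvP]
  · interval_cases c
    rw [hz, pvP_zero_right]

theorem pvInv_row_step (nums : List (List Int)) (H W i : Nat) (dp : List (List Int))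
    (h : pvInv nums H W i W dp) : pvInv nums H W (i+1) 0 dp := by
  obtain ⟨h1, h2, h3, h4⟩ := h
  refine ⟨h1, h2, h3, ?_⟩
  intro r c hr hc hcase
  rcases hcase with h | ⟨rfl, hc0⟩
  · rcases Nat.lt_succ_iff_lt_or_eq.1 h with h | rfl
    · exact h4 r c hr hc (Or.inl h)
    · exact h4 r c hr hc (Or.inr ⟨rfl, hc⟩)
  · interval_cases c
    rw [h3, pvP_zero_right]

theorem pvAStepJ_correct (nums : List (List Int)) (H W i n : Nat) (dp : List (List Int))
    (a : Option Int) (hi1 : 1 ≤ i) (hiH : i ≤ H) (hn : n + 1 ≤ W)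
    (hInv : pvInv nums H W i n dp) :
    ∃ dp', pvAStepJ nums i (dp, a) n = (dp', (pvCell nums i (n+1)).foldl pvMin a) ∧
      pvInv nums H W i (n+1) dp' := by
  obtain ⟨i', rfl⟩ : ∃ i', i = i' + 1 := ⟨i - 1, by omega⟩
  obtain ⟨h1, h2, h3, h4⟩ := hInv
  have hidp : i' + 1 < dp.length := by omega
  have hrowlen : (dp.getD (i'+1) []).length = W+1 := by
    rw [List.getD_eq_getElem _ _ hidp]
    exact h2 _ (List.getElem_mem hidp)
  -- the assigned value is the prefix sum P i (n+1)
  have hv : (nums.getD (i'+1-1) []).getD (n+1-1) 0 + pvG dp (i'+1-1) (n+1) + pvG dp (i'+1) (n+1-1)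
      - pvG dp (i'+1-1) (n+1-1) = pvP nums (i'+1) (n+1) := by
    have e1 : pvG dp i' (n+1) = pvP nums i' (n+1) := h4 _ _ (by omega) (by omega) (by omega)
    have e2 : pvG dp (i'+1) n = pvP nums (i'+1) n := h4 _ _ (by omega) (by omega) (by omega)
    have e3 : pvG dp i' n = pvP nums i' n := h4 _ _ (by omega) (by omega) (by omega)
    simp only [Nat.add_sub_cancel]
    rw [e1, e2, e3, pvP_succ_succ]
  set i := i' + 1 with hidef
  set v := (nums.getD (i-1) []).getD (n+1-1) 0 + pvG dp (i-1) (n+1) + pvG dp i (n+1-1)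
      - pvG dp (i-1) (n+1-1) with hvdef
  have hshape := pvSet2_shape dp i (n+1) v H W hidp h1 h2
  have hget : ∀ r' c', pvG (pvSet2 dp i (n+1) v) r' c' =
      if r' = i ∧ c' = n+1 then v else pvG dp r' c' :=
    fun r' c' => pvG_set2 dp i (n+1) v r' c' hidp (by omega)
  have hInv' : pvInv nums H W i (n+1) (pvSet2 dp i (n+1) v) := by
    refine ⟨hshape.1, hshape.2, ?_, ?_⟩
    · intro r
      rw [hget]
      rw [if_neg (by omega)]
      exact h3 r
    · intro r c hr hc hcase
      rw [hget]
      split_ifs with hif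
      · rw [hv]; rw [hif.1, hif.2]
      · apply h4 r c hr hc
        rcases hcase with h | ⟨rfl, hc'⟩
        · exact Or.inl h
        · right
          refine ⟨rfl, ?_⟩
          rcases Nat.lt_succ_iff_lt_or_eq.1 (Nat.lt_succ_of_le hc') with h | h
          · omega
          · exact absurd ⟨rfl, h⟩ hif
  refine ⟨pvSet2 dp i (n+1) v, ?_, hInv'⟩
  simp only [pvAStepJ]
  refine Prod.ext rfl ?_
  show pvAInner (pvSet2 dp i (n+1) v) i (n+1) a = (pvCell nums i (n+1)).foldl pvMin a
  unfold pvAInner pvCell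
  rw [List.foldl_flatMap]
  apply PySem.List.foldl_congr_mem
  intro acc h hh
  rw [List.foldl_map]
  apply PySem.List.foldl_congr_mem
  intro acc' w hw
  obtain ⟨_, _, _, h4'⟩ := hInv'
  rw [List.mem_range] at hh hw
  have r1 : pvG (pvSet2 dp i (n+1) v) i (n+1) = pvP nums i (n+1) :=
    h4' _ _ (by omega) (by omega) (by omega)
  have r2 : pvG (pvSet2 dp i (n+1) v) h (n+1) = pvP nums h (n+1) :=
    h4' _ _ (by omega) (by omega) (by omega)
  have r3 : pvG (pvSet2 dp i (n+1) v) i w = pvP nums i w :=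
    h4' _ _ (by omega) (by omega) (by omega)
  have r4 : pvG (pvSet2 dp i (n+1) v) h w = pvP nums h w :=
    h4' _ _ (by omega) (by omega) (by omega)
  rw [r1, r2, r3, r4]
  rfl

theorem pvARow_correct (nums : List (List Int)) (H W i : Nat) (dp : List (List Int))
    (a : Option Int) (hi1 : 1 ≤ i) (hiH : i ≤ H)
    (hInv : pvInv nums H W i 0 dp) (n : Nat) (hn : n ≤ W) :
    ∃ dp', (List.range n).foldl (pvAStepJ nums i) (dp, a) =
        (dp', (pvRowL nums n i).foldl pvMin a) ∧ pvInv nums H W i n dp' := by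
  induction n with
  | zero => exact ⟨dp, by simp [pvRowL], hInv⟩
  | succ n ih =>
    obtain ⟨dpn, heq, hInvn⟩ := ih (by omega)
    obtain ⟨dp', heq', hInv'⟩ :=
      pvAStepJ_correct nums H W i n dpn ((pvRowL nums n i).foldl pvMin a) hi1 hiH hn hInvn
    refine ⟨dp', ?_, hInv'⟩
    rw [List.range_succ, List.foldl_append, heq]
    simp only [List.foldl_cons, List.foldl_nil, heq']
    simp only [pvRowL, List.range_succ, List.flatMap_append, List.foldl_append,
      List.flatMap_cons, List.flatMap_nil, List.append_nil]

theorem pvA_fold_correct (nums : List (List Int)) (H W n : Nat) (hn : n ≤ H) :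
    ∃ dp', (List.range n).foldl (pvAStepI nums W)
        (List.replicate (H+1) (List.replicate (W+1) (0:Int)), (none : Option Int)) =
      (dp', (pvLA nums W n).foldl pvMin none) ∧ pvInv nums H W (n+1) 0 dp' := by
  induction n with
  | zero => exact ⟨_, by simp [pvLA], pvInv_init nums H W⟩
  | succ n ih =>
    obtain ⟨dpn, heq, hInvn⟩ := ih (by omega)
    obtain ⟨dp', heq', hInv'⟩ := pvARow_correct nums H W (n+1) dpn
      ((pvLA nums W n).foldl pvMin none) (by omega) (by omega) hInvn W le_rfl
    refine ⟨dp', ?_, pvInv_row_step nums H W (n+1) dp' hInv'⟩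
    rw [List.range_succ, List.foldl_append, heq]
    simp only [List.foldl_cons, List.foldl_nil, pvAStepI, heq']
    simp only [pvLA, List.range_succ, List.flatMap_append, List.foldl_append,
      List.flatMap_cons, List.flatMap_nil, List.append_nil]

theorem minSubMatrixSum_eq (nums : List (List Int)) :
    minSubMatrixSum nums =
      ((pvLA nums (nums.headD []).length nums.length).foldl pvMin none).getD 0 := by
  obtain ⟨dp', heq, _⟩ := pvA_fold_correct nums nums.length (nums.headD []).length
    nums.length le_rfl
  simp only [minSubMatrixSum, heq]

-- ===== B-side: prefix table and Kadane scan =====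

def pvCtab (nums : List (List Int)) (W n : Nat) : List (List Int) :=
  (List.range (n+1)).map (fun r => (List.range (W+1)).map (fun j => pvP nums r j))

theorem pvRowPref_go (row : List Int) (n : Nat) :
    (List.range n).foldl
      (fun (st : Int × List Int) c => (st.1 + row.getD c 0, st.2 ++ [st.1 + row.getD c 0]))
      ((0:Int), [(0:Int)]) =
    (∑ c ∈ Finset.range n, row.getD c 0,
     (List.range (n+1)).map (fun j => ∑ c ∈ Finset.range j, row.getD c 0)) := by
  induction n with
  | zero => simp
  | succ n ih =>
    rw [List.range_succ, List.foldl_append, ih]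
    simp only [List.foldl_cons, List.foldl_nil]
    refine Prod.ext ?_ ?_
    · exact (Finset.sum_range_succ _ n).symm
    · show _ ++ [_] = _
      rw [List.range_succ (n := n+1), List.map_append, List.map_singleton,
        Finset.sum_range_succ]

theorem pvRowPref_eq (row : List Int) (W : Nat) :
    pvRowPref row W = (List.range (W+1)).map (fun j => ∑ c ∈ Finset.range j, row.getD c 0) := by
  unfold pvRowPref
  rw [pvRowPref_go]

theorem pvP_succ_left (nums : List (List Int)) (n j : Nat) :
    pvP nums (n+1) j = pvP nums n j + ∑ c ∈ Finset.range j, (nums.getD n []).getD c 0 :=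
  Finset.sum_range_succ _ n

theorem pvCtab_succ (nums : List (List Int)) (W n : Nat) :
    pvCtab nums W (n+1) = pvCtab nums W n ++ [(List.range (W+1)).map (fun j => pvP nums (n+1) j)] := by
  unfold pvCtab
  rw [List.range_succ (n := n+1), List.map_append, List.map_singleton]

theorem pvBStepRow_correct (nums : List (List Int)) (W n : Nat) :
    pvBStepRow W (pvCtab nums W n) (nums.getD n []) = pvCtab nums W (n+1) := by
  have hlast : (pvCtab nums W n).getLastD [] = (List.range (W+1)).map (fun j => pvP nums n j) := by
    unfold pvCtab
    rw [List.range_succ (n := n), List.map_append, List.map_singleton, List.getLastD_concat]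
  simp only [pvBStepRow, pvCtab_succ, hlast, pvRowPref_eq]
  congr 1
  congr 1
  apply List.map_congr_left
  intro j hj
  rw [List.mem_range] at hj
  rw [PySem.List.getD_map_range _ _ _ _ hj, PySem.List.getD_map_range _ _ _ _ hj,
    pvP_succ_left]

theorem pvC_go (nums : List (List Int)) (W : Nat) :
    ∀ (l pre : List (List Int)), nums = pre ++ l →
    l.foldl (pvBStepRow W) (pvCtab nums W pre.length) = pvCtab nums W (pre.length + l.length) := by
  intro l
  induction l with
  | nil => intro pre h; simp
  | cons row rest ih =>
    intro pre h
    have hrow : row = nums.getD pre.length [] := by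
      rw [h, List.getD_eq_getElem?_getD, List.getElem?_append_right le_rfl]
      simp
    rw [List.foldl_cons, hrow, pvBStepRow_correct]
    have h2 := ih (pre ++ [row]) (by rw [h]; simp)
    rw [List.length_append, List.length_singleton] at h2
    rw [h2]
    congr 1
    simp
    omega

theorem pvC_eq (nums : List (List Int)) (W : Nat) :
    nums.foldl (pvBStepRow W) [List.replicate (W+1) (0:Int)] = pvCtab nums W nums.length := by
  have h0 : [List.replicate (W+1) (0:Int)] = pvCtab nums W 0 := by
    unfold pvCtab
    rw [List.range_one, List.map_singleton]
    congr 1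
    have : ∀ j ∈ List.range (W+1), pvP nums 0 j = (fun _ => (0:Int)) j := by
      intro j _; simp only [pvP, Finset.range_zero, Finset.sum_empty]
    rw [List.map_congr_left this, List.map_const', List.length_range]
  rw [h0]
  simpa using pvC_go nums W nums [] rfl

theorem pvG_Ctab (nums : List (List Int)) (W n r j : Nat) (hr : r ≤ n) (hj : j ≤ W) :
    pvG (pvCtab nums W n) r j = pvP nums r j := by
  unfold pvG pvCtab
  rw [PySem.List.getD_map_range _ _ _ _ (by omega), PySem.List.getD_map_range _ _ _ _ (by omega)]

theorem foldl_min_sub (c : Int) (l : List Int) : ∀ x,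
    (l.map (fun y => c - y)).foldl min (c - x) = c - l.foldl max x := by
  induction l with
  | nil => intro x; rfl
  | cons y t ih =>
    intro x
    simp only [List.map_cons, List.foldl_cons]
    rw [show min (c - x) (c - y) = c - max x y by rw [Int.max_def, Int.min_def]; split_ifs <;> omega,
      ih]

theorem band_inner (S : Nat → Int) (hS0 : S 0 = 0) (b : Option Int) (j : Nat) :
    ((List.range (j+1)).map (fun w => S (j+1) - S w)).foldl pvMin b
      = pvMin b (S (j+1) - (List.range j).foldl (fun mx t => max mx (S (t+1))) 0) := by
  have key : (List.range (j+1)).map (fun w => S (j+1) - S w)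
      = (S (j+1) - S 0) :: ((List.range j).map (fun t => S (t+1))).map (fun y => S (j+1) - y) := by
    rw [List.range_succ_eq_map, List.map_cons, List.map_map, List.map_map]
    rfl
  rw [key, foldl_pvMin_cons, hS0, foldl_min_sub, List.foldl_map]

theorem pvBScan_go (nums : List (List Int)) (H W h i : Nat)
    (hh : h < i) (hi : i ≤ H) (best : Option Int) (n : Nat) (hn : n ≤ W) :
    (List.range n).foldl (pvBScanJ (pvCtab nums W H) h i) ((0:Int), best)
      = ((List.range n).foldl (fun mx t => max mx (pvP nums i (t+1) - pvP nums h (t+1))) 0,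
         ((List.range n).flatMap
           (fun j' => (List.range (j'+1)).map (fun w => pvVal nums h i w (j'+1)))).foldl
           pvMin best) := by
  induction n with
  | zero => simp
  | succ n ih =>
    rw [List.range_succ, List.foldl_append, List.foldl_append, List.flatMap_append,
      List.foldl_append, ih (by omega)]
    simp only [List.foldl_cons, List.foldl_nil, List.flatMap_cons, List.flatMap_nil,
      List.append_nil]
    simp only [pvBScanJ]
    have hs : pvG (pvCtab nums W H) i (n+1) - pvG (pvCtab nums W H) h (n+1)
        = pvP nums i (n+1) - pvP nums h (n+1) := by
      rw [pvG_Ctab nums W H i (n+1) (by omega) (by omega),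
        pvG_Ctab nums W H h (n+1) (by omega) (by omega)]
    rw [hs]
    set M := (List.range n).foldl (fun mx t => max mx (pvP nums i (t+1) - pvP nums h (t+1))) 0 with hM
    set BN := ((List.range n).flatMap
        (fun j' => (List.range (j'+1)).map (fun w => pvVal nums h i w (j'+1)))).foldl pvMin best with hBN
    refine Prod.ext ?_ ?_
    · rw [Int.max_def]
      split_ifs <;> omega
    · have hlist : (List.range (n+1)).map (fun w => pvVal nums h i w (n+1))
          = (List.range (n+1)).map
              (fun w => (pvP nums i (n+1) - pvP nums h (n+1)) - (pvP nums i w - pvP nums h w)) :=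
        List.map_congr_left (fun w _ => by simp only [pvVal]; ring)
      have hband := band_inner (fun j => pvP nums i j - pvP nums h j)
        (by simp [pvP_zero_right]) BN n
      simp only [] at hband
      rw [hlist, hband]
      cases BN with
      | none => rfl
      | some b =>
        simp only [pvMin, Int.min_def]
        split_ifs <;> exact congrArg some (by omega)

theorem pvBBand_correct (nums : List (List Int)) (H W h i : Nat)
    (hh : h < i) (hi : i ≤ H) (best : Option Int) :
    pvBBand (pvCtab nums W H) W h i best = (pvBandL nums W h i).foldl pvMin best := by
  unfold pvBBand pvBandL
  rw [pvBScan_go nums H W h i hh hi best W le_rfl]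

theorem minSubMatrixSum_alt_eq (nums : List (List Int)) :
    minSubMatrixSum_alt nums =
      ((pvLB nums nums.length (nums.headD []).length).foldl pvMin none).getD 0 := by
  simp only [minSubMatrixSum_alt]
  rw [pvC_eq]
  congr 1
  rw [pvLB, List.foldl_flatMap]
  apply PySem.List.foldl_congr_mem
  intro acc h hh
  rw [List.foldl_flatMap]
  apply PySem.List.foldl_congr_mem
  intro acc' d hd
  rw [List.mem_range] at hh hd
  exact pvBBand_correct nums nums.length (nums.headD []).length h (h+1+d) (by omega) (by omega) acc'


-- ===== VERDICT (by name: the statement is the Claim_ definition above) =====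
theorem minSubMatrixSum_spec : Claim_equal_minSubMatrixSum := by
  intro nums _hDom hPre
  unfold Spec_minSubMatrixSum
  obtain ⟨hne, hW, _hrows⟩ := hPre
  rw [minSubMatrixSum_eq, minSubMatrixSum_alt_eq]
  congr 1
  apply foldl_pvMin_congr
  · exact List.ne_nil_of_mem ((mem_pvLA_iff nums _ _ _).2
      ⟨0, 1, 0, 1, by omega, by simpa using List.length_pos_iff.2 hne, by omega, by omega, rfl⟩)
  · exact List.ne_nil_of_mem ((mem_pvLB_iff nums _ _ _).2
      ⟨0, 1, 0, 1, by omega, by simpa using List.length_pos_iff.2 hne, by omega, by omega, rfl⟩)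
  · intro x
    rw [mem_pvLA_iff, mem_pvLB_iff]
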